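-- pv_equiv track=rewrite | github.com/niconm89/BUSCO2Tree | scripts/fasta2phylip.py | read_phylip_interleaved
-- ===== SOURCE A (Python) =====
-- def read_phylip_interleaved(PHYLIP_FILE,nseqs,nchars):
-- 	dict_seqs = {}
-- 	seqs_order = {}
-- 	i = 0
-- 	while i < nseqs: #get the first part (with id) of each taxon
-- 		i += 1
-- 		line = PHYLIP_FILE.pop(0).strip() #remove this line from file
-- 		seqs_order[i] = line
-- 		dict_seqs[i] = ''
-- 	#Read the rest of the lines with only sequences
-- 	count = 0
-- 	for line in PHYLIP_FILE: #get the rest of the lines for each taxon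
-- 		line = line.rstrip()
-- 		if line == '':
-- 			continue
-- 		else:
-- 			taxon_seq = line.replace(' ','')
-- 			count += 1
-- 			dict_seqs[count] += taxon_seq
-- 			if count == nseqs:
-- 				count = 0
-- 	acumulate_len = len(dict_seqs[1])
-- 	#back to the first lines
-- 	rest_len = nchars - acumulate_len #number of characters in each first line
-- 	for i in range(1,nseqs+1):
-- 		first_part_taxon = seqs_order[i].replace(' ','')
-- 		taxon_id = first_part_taxon[:-rest_len]
-- 		dict_seqs[i] = first_part_taxon[-rest_len:] + dict_seqs[i]
-- 		dict_seqs[taxon_id] = dict_seqs.pop(i) #remove key = i and update key taxon_id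
-- 	return dict_seqs
-- ===== SOURCE B (Python) =====
-- def read_phylip_interleaved(PHYLIP_FILE, nseqs, nchars):
--     # pops the first nseqs lines, mutating PHYLIP_FILE exactly like the original
--     header = [PHYLIP_FILE.pop(0).strip() for _ in range(nseqs)]
--     body = [l.rstrip() for l in PHYLIP_FILE]
--     body = [l for l in body if l != '']
--     # group each taxon's interleaved blocks by stride-slicing instead of a rotating counter
--     tails = [''.join(l.replace(' ', '') for l in body[i::nseqs]) for i in range(nseqs)]
--     rest_len = nchars - len(tails[0])
--     result = {}
--     for i in range(nseqs):
--         first = header[i].replace(' ', '')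
--         result[first[:-rest_len]] = first[-rest_len:] + tails[i]
--     return result
-- ===== Notes on version B (the rewrite author's own statement) =====
-- stated objective: alternative
-- what changed: B groups each taxon's interleaved body blocks consecutively by stride-slicing the filtered body (body[i::nseqs]) and joins them per taxon, instead of A's single round-robin pass with a rotating counter that appends into a mixed-key dict and then renames integer keys; B builds the id-keyed dict directly. Both implementations pop the first nseqs lines off PHYLIP_FILE (same mutation).
import Mathlib
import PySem

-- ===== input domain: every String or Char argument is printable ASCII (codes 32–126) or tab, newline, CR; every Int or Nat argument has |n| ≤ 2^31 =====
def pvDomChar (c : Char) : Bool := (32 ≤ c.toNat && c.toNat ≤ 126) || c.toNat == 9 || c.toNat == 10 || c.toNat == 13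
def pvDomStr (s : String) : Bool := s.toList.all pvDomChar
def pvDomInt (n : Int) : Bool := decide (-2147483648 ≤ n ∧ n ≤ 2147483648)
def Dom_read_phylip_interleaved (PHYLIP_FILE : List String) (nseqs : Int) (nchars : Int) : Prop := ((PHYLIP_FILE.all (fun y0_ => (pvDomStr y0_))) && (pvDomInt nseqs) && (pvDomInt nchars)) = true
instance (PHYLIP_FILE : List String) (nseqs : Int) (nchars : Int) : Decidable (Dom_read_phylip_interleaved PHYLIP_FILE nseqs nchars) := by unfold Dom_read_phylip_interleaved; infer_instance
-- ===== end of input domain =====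

-- B re-groups the interleaved body per taxon by stride-slicing instead of A's rotating counter
-- (objective: alternative decomposition, same cost). Both Pythons pop the first nseqs lines off
-- PHYLIP_FILE (same mutation); the theorems below are about the RETURN value.

-- ===== PORT A =====
-- Python keeps int keys and str keys in ONE dict; int and str keys can never collide and every
-- int key is popped by the final loop, so the port carries the int-keyed part and the str-keyed
-- part as a pair of dicts and returns the str part's items.

-- while i < nseqs: i += 1; line = PHYLIP_FILE.pop(0).strip(); seqs_order[i] = line; dict_seqs[i] = ''
-- (fuel = nseqs.toNat = number of iterations; the [] case is Python's IndexError, excluded by Pre_)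
def pvA_phase1 (fuel : Nat) (file : List String) (i : Int)
    (seqs_order : PySem.Dict Int String) (dict_seqs : PySem.Dict Int String) :
    List String × PySem.Dict Int String × PySem.Dict Int String :=
  match fuel, file with
  | 0, _ => (file, seqs_order, dict_seqs)
  | _ + 1, [] => (file, seqs_order, dict_seqs)
  | fuel + 1, l :: rest =>
      let line := PySem.Str.strip l
      pvA_phase1 fuel rest (i + 1) (seqs_order.insert (i + 1) line) (dict_seqs.insert (i + 1) "")

-- the body of 'for line in PHYLIP_FILE:' with state (count, dict_seqs)
-- (dict_seqs[count] += taxon_seq: the key is present on every input Pre_ admits, so 'modify' is exact)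
def pvA_step2 (nseqs : Int) (s : Int × PySem.Dict Int String) (l : String) :
    Int × PySem.Dict Int String :=
  let line := PySem.Str.rstrip l
  if line = "" then s
  else
    let taxon_seq := PySem.Str.replace line " " ""
    let count := s.1 + 1
    let d := s.2.modify count "" (fun v => v ++ taxon_seq)
    (if count = nseqs then 0 else count, d)

-- the body of 'for i in range(1, nseqs+1):' with state (int-keyed dict, str-keyed dict)
-- (seqs_order[i] and dict_seqs.pop(i) are present on every input Pre_ admits, so getD/erase are exact)
def pvA_step3 (seqs_order : PySem.Dict Int String) (rest_len : Int)
    (s : PySem.Dict Int String × PySem.Dict String String) (i : Int) :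
    PySem.Dict Int String × PySem.Dict String String :=
  let first_part_taxon := PySem.Str.replace (seqs_order.getD i "") " " ""
  let taxon_id := PySem.Str.slice first_part_taxon none (some (-rest_len))
  let dInt := s.1.insert i (PySem.Str.slice first_part_taxon (some (-rest_len)) none ++ s.1.getD i "")
  let v := dInt.getD i ""
  (dInt.erase i, s.2.insert taxon_id v)

def read_phylip_interleaved (PHYLIP_FILE : List String) (nseqs : Int) (nchars : Int) :
    List (String × String) :=
  let p1 := pvA_phase1 nseqs.toNat PHYLIP_FILE 0 PySem.Dict.empty PySem.Dict.empty
  let seqs_order := p1.2.1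
  let p2 := p1.1.foldl (pvA_step2 nseqs) (0, p1.2.2)
  let acumulate_len := PySem.Str.len (p2.2.getD 1 "")      -- dict_seqs[1] (KeyError when nseqs < 1: excluded by Pre_)
  let rest_len := nchars - acumulate_len
  let fin := (PySem.List.pyRange 1 (nseqs + 1) 1).foldl (pvA_step3 seqs_order rest_len)
               (p2.2, PySem.Dict.empty)
  fin.2.items

-- ===== PORT B =====

-- def _every_nth(lst, n): return [] if not lst else [lst[0]] + _every_nth(lst[1:][n-1:], n)
-- (rest.drop (n.toNat - 1) = lst[1:][n-1:] for the n ≥ 1 this helper is ever called with)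
def pvEveryNth (lst : List String) (n : Int) : List String :=
  match lst with
  | [] => []
  | _ :: rest => lst.headD "" :: pvEveryNth (rest.drop (n.toNat - 1)) n
termination_by lst.length
decreasing_by simp

-- t += l.replace(' ', '')
def pvB_app (acc : String) (l : String) : String := acc ++ PySem.Str.replace l " " ""

-- the inner loop building one taxon's tail from body[i::nseqs]
def pvB_tail (body : List String) (nseqs : Int) (i : Int) : String :=
  (pvEveryNth (PySem.List.slice body (some i) none) nseqs).foldl pvB_app ""

def read_phylip_interleaved_alt (PHYLIP_FILE : List String) (nseqs : Int) (nchars : Int) :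
    List (String × String) :=
  let n := nseqs.toNat
  let header := (PHYLIP_FILE.take n).map PySem.Str.strip       -- the nseqs popped-and-stripped lines
  let body := ((PHYLIP_FILE.drop n).map PySem.Str.rstrip).filter (fun l => l != "")
  let tails := (List.range n).map (fun (i : Nat) => pvB_tail body nseqs (i : Int))
  let rest_len := nchars - PySem.Str.len (tails.getD 0 "")    -- tails[0] (IndexError when nseqs < 1: excluded by Pre_)
  let fin := (List.range n).foldl (fun d i =>
      let first := PySem.Str.replace (header.getD i "") " " ""
      d.insert (PySem.Str.slice first none (some (-rest_len)))
               (PySem.Str.slice first (some (-rest_len)) none ++ tails.getD i ""))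
      (PySem.Dict.empty : PySem.Dict String String)
  fin.items

-- ===== PRECONDITION & SPEC =====
-- Pre_ excludes exactly the inputs where Python A raises: nseqs < 1 (KeyError on dict_seqs[1])
-- and nseqs > len(PHYLIP_FILE) (IndexError on PHYLIP_FILE.pop(0)).
def Pre_read_phylip_interleaved (PHYLIP_FILE : List String) (nseqs : Int) (nchars : Int) : Prop :=
  1 ≤ nseqs ∧ nseqs ≤ PHYLIP_FILE.length
instance (PHYLIP_FILE : List String) (nseqs : Int) (nchars : Int) : Decidable (Pre_read_phylip_interleaved PHYLIP_FILE nseqs nchars) := by unfold Pre_read_phylip_interleaved; infer_instance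

def pvWitness_read_phylip_interleaved : List String × Int × Int :=
  (["t1 AC", "t2 GT", "AA", "TT"], 2, 4)

def Spec_read_phylip_interleaved (PHYLIP_FILE : List String) (nseqs : Int) (nchars : Int) (out : List (String × String)) : Prop := out = read_phylip_interleaved_alt PHYLIP_FILE nseqs nchars
instance (PHYLIP_FILE : List String) (nseqs : Int) (nchars : Int) (out : List (String × String)) : Decidable (Spec_read_phylip_interleaved PHYLIP_FILE nseqs nchars out) := by unfold Spec_read_phylip_interleaved; infer_instance

-- ===== CLAIM (what is proved, stated in full; the proofs are below) =====
def Claim_equal_read_phylip_interleaved : Prop := ∀ (PHYLIP_FILE : List String) (nseqs : Int) (nchars : Int), Dom_read_phylip_interleaved PHYLIP_FILE nseqs nchars → Pre_read_phylip_interleaved PHYLIP_FILE nseqs nchars → Spec_read_phylip_interleaved PHYLIP_FILE nseqs nchars (read_phylip_interleaved PHYLIP_FILE nseqs nchars)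

-- ===== LEMMAS AND PROOFS =====

-- the rstripped non-blank body lines (what both loops actually consume)
def pvFilt (xs : List String) : List String :=
  (xs.map PySem.Str.rstrip).filter (fun l => l != "")

-- offset into the filtered body of the next line taxon j will receive when the counter is at c
def pvOff (n c j : Nat) : Nat := if c < j then j - 1 - c else n + j - 1 - c

theorem pvEveryNth_nil (n : Int) : pvEveryNth [] n = [] := by
  rw [pvEveryNth.eq_def]

theorem pvEveryNth_cons (x : String) (rest : List String) (n : Int) :
    pvEveryNth (x :: rest) n = x :: pvEveryNth (rest.drop (n.toNat - 1)) n := by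
  rw [pvEveryNth.eq_def]
  simp

theorem pvB_app_prefix (L : List String) (s : String) :
    L.foldl pvB_app s = s ++ L.foldl pvB_app "" := by
  induction L generalizing s with
  | nil => simp
  | cons a L ih =>
      simp only [List.foldl_cons]
      rw [ih (pvB_app s a), ih (pvB_app "" a)]
      simp [pvB_app, String.append_assoc]

theorem pv_getD_erase_of_ne (d : PySem.Dict Int String) (i j : Int) (h : j ≠ i) :
    (d.erase i).getD j "" = d.getD j "" := by
  obtain ⟨items⟩ := d
  simp only [PySem.Dict.erase, PySem.Dict.getD, PySem.Dict.get?]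
  induction items with
  | nil => rfl
  | cons p rest ih =>
      by_cases hp : p.1 = i
      · have h1 : List.filter (fun q => !q.1 == i) (p :: rest) =
            List.filter (fun q => !q.1 == i) rest := by simp [hp]
        have h2 : List.find? (fun q => q.1 == j) (p :: rest) =
            List.find? (fun q => q.1 == j) rest :=
          List.find?_cons_of_neg (by simp [hp]; omega)
        rw [h1, h2]; exact ih
      · have h1 : List.filter (fun q => !q.1 == i) (p :: rest) =
            p :: List.filter (fun q => !q.1 == i) rest := by simp [hp]
        rw [h1]
        by_cases hj : p.1 = j
        · rw [List.find?_cons_of_pos (by simp [hj]), List.find?_cons_of_pos (by simp [hj])]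
        · rw [List.find?_cons_of_neg (by simp [hj]), List.find?_cons_of_neg (by simp [hj])]
          exact ih

theorem pv_phase1_rest (n : Nat) (file : List String) (i : Int)
    (so ds : PySem.Dict Int String) (h : n ≤ file.length) :
    (pvA_phase1 n file i so ds).1 = file.drop n := by
  induction n generalizing file i so ds with
  | zero => simp [pvA_phase1]
  | succ n ih =>
      cases file with
      | nil => simp at h
      | cons x rest =>
          simp only [pvA_phase1, List.drop_succ_cons]
          exact ih rest _ _ _ (by simpa using h)

theorem pv_phase1_ds (n : Nat) (file : List String) (i : Int)
    (so ds : PySem.Dict Int String) (h : ∀ j, ds.getD j "" = "") :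
    ∀ j, (pvA_phase1 n file i so ds).2.2.getD j "" = "" := by
  induction n generalizing file i so ds with
  | zero => simpa [pvA_phase1] using h
  | succ n ih =>
      cases file with
      | nil => simpa [pvA_phase1] using h
      | cons x rest =>
          simp only [pvA_phase1]
          refine ih rest _ _ _ (fun j => ?_)
          rw [PySem.Dict.getD_insert]
          split <;> simp [h]

theorem pv_phase1_so (n : Nat) (file : List String) (i : Int)
    (so ds : PySem.Dict Int String) (h : n ≤ file.length) (j : Int) :
    (pvA_phase1 n file i so ds).2.1.getD j "" =
      if i < j ∧ j ≤ i + n then PySem.Str.strip (file.getD (j - i - 1).toNat "")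
      else so.getD j "" := by
  induction n generalizing file i so ds with
  | zero =>
      simp only [pvA_phase1]
      rw [if_neg (by omega)]
  | succ n ih =>
      cases file with
      | nil => simp at h
      | cons x rest =>
          simp only [pvA_phase1]
          rw [ih rest (i + 1) _ _ (by simpa using h)]
          by_cases h1 : i + 1 < j ∧ j ≤ i + 1 + n
          · rw [if_pos h1, if_pos (by omega)]
            have h2 : (j - i - 1).toNat = (j - (i + 1) - 1).toNat + 1 := by omega
            rw [h2]
            simp
          · rw [if_neg h1, PySem.Dict.getD_insert]
            by_cases h2 : j = i + 1
            · rw [if_pos h2, if_pos (by omega)]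
              have h3 : (j - i - 1).toNat = 0 := by omega
              simp [h3]
            · rw [if_neg h2, if_neg (by omega)]

theorem pv_phase2 (n : Nat) (hn : 1 ≤ n) (xs : List String) (c : Nat) (d : PySem.Dict Int String)
    (j : Nat) (hc : c < n) (hj1 : 1 ≤ j) (hj2 : j ≤ n) :
    (xs.foldl (pvA_step2 (n : Int)) (((c : Nat) : Int), d)).2.getD (j : Int) "" =
      d.getD (j : Int) "" ++
        (pvEveryNth ((pvFilt xs).drop (pvOff n c j)) (n : Int)).foldl pvB_app "" := by
  induction xs generalizing c d with
  | nil => simp [pvFilt, pvEveryNth_nil]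
  | cons x xs ih =>
      simp only [List.foldl_cons]
      by_cases hx : PySem.Str.rstrip x = ""
      · have hstep : pvA_step2 (n : Int) (((c : Nat) : Int), d) x = (((c : Nat) : Int), d) := by
          simp [pvA_step2, hx]
        have hfilt : pvFilt (x :: xs) = pvFilt xs := by
          simp [pvFilt, hx]
        rw [hstep, hfilt, ih c d hc]
      · have hfilt : pvFilt (x :: xs) = PySem.Str.rstrip x :: pvFilt xs := by
          simp [pvFilt, hx]
        set r := PySem.Str.replace (PySem.Str.rstrip x) " " "" with hr
        have hstep : pvA_step2 (n : Int) (((c : Nat) : Int), d) x =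
            ((if ((c : Int) + 1) = (n : Int) then 0 else (c : Int) + 1),
             d.modify ((c : Int) + 1) "" (fun v => v ++ r)) := by
          simp [pvA_step2, hx, hr]
        rw [hstep]
        set c' : Nat := if c + 1 = n then 0 else c + 1 with hc'
        have hcast : (if ((c : Int) + 1) = (n : Int) then (0 : Int) else (c : Int) + 1) =
            ((c' : Nat) : Int) := by
          rw [hc']
          by_cases h : c + 1 = n
          · rw [if_pos (by omega), if_pos h]
            rfl
          · rw [if_neg (by omega), if_neg h]
            push_cast
            ring
        rw [hcast]
        have hc'lt : c' < n := by rw [hc']; split <;> omega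
        rw [ih c' _ hc'lt]
        rw [PySem.Dict.getD_modify]
        by_cases hjc : j = c + 1
        · rw [if_pos (by omega : ((j : Nat) : Int) = (c : Int) + 1)]
          have hoff : pvOff n c j = 0 := by unfold pvOff; split <;> omega
          have hoff' : pvOff n c' j = n - 1 := by
            rw [hc']; simp only [pvOff]; split <;> (split <;> omega)
          rw [hfilt, hoff, hoff', List.drop_zero, pvEveryNth_cons]
          simp only [List.foldl_cons]
          rw [pvB_app_prefix _ (pvB_app "" (PySem.Str.rstrip x))]
          have : pvB_app "" (PySem.Str.rstrip x) = r := by simp [pvB_app, hr]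
          rw [this, Int.toNat_natCast, String.append_assoc]
          have hjcast : ((j : Nat) : Int) = (c : Int) + 1 := by exact_mod_cast hjc
          rw [hjcast]
        · rw [if_neg (by omega : ¬ ((j : Nat) : Int) = (c : Int) + 1)]
          have hoff : pvOff n c j = pvOff n c' j + 1 := by
            rw [hc']; simp only [pvOff]; split <;> (split <;> (split <;> omega))
          rw [hfilt, hoff, List.drop_succ_cons]

theorem pv_phase3 (so : PySem.Dict Int String) (rl : Int) (ks : List Int) (v : Int → String)
    (dI : PySem.Dict Int String) (dS : PySem.Dict String String)
    (hv : ∀ j ∈ ks, dI.getD j "" = v j) (hnd : ks.Nodup) :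
    (ks.foldl (pvA_step3 so rl) (dI, dS)).2 =
      ks.foldl (fun d i =>
        d.insert (PySem.Str.slice (PySem.Str.replace (so.getD i "") " " "") none (some (-rl)))
          (PySem.Str.slice (PySem.Str.replace (so.getD i "") " " "") (some (-rl)) none ++ v i))
        dS := by
  induction ks generalizing dI dS with
  | nil => rfl
  | cons i ks ih =>
      simp only [List.foldl_cons]
      have hvi : dI.getD i "" = v i := hv i (by simp)
      have hstep : pvA_step3 so rl (dI, dS) i =
          ((dI.insert i (PySem.Str.slice (PySem.Str.replace (so.getD i "") " " "") (some (-rl)) none ++ v i)).erase i,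
            dS.insert (PySem.Str.slice (PySem.Str.replace (so.getD i "") " " "") none (some (-rl)))
              (PySem.Str.slice (PySem.Str.replace (so.getD i "") " " "") (some (-rl)) none ++ v i)) := by
        simp only [pvA_step3, hvi]
        rw [PySem.Dict.getD_insert_self]
      rw [hstep]
      apply ih
      · intro j hj
        have hji : j ≠ i := by
          rcases List.nodup_cons.mp hnd with ⟨hni, _⟩
          intro hh; exact hni (hh ▸ hj)
        rw [pv_getD_erase_of_ne _ _ _ hji, PySem.Dict.getD_insert, if_neg hji]
        exact hv j (by simp [hj])
      · exact (List.nodup_cons.mp hnd).2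

theorem pv_getD_map_range (m k : Nat) (f : Nat → String) (hk : k < m) :
    ((List.range m).map (fun i => f i)).getD k "" = f k := by
  simp [List.getD, hk]

theorem pv_getD_map_take (file : List String) (m k : Nat) (f : String → String) (hk : k < m)
    (hm : m ≤ file.length) : ((file.take m).map f).getD k "" = f (file.getD k "") := by
  have hkl : k < file.length := lt_of_lt_of_le hk hm
  simp [List.getD, List.getElem?_map, hk, List.getElem?_eq_getElem hkl]

theorem pv_pyRange_eq (m : Nat) (hm : 1 ≤ m) :
    PySem.List.pyRange 1 ((m : Int) + 1) 1 = (List.range m).map (fun k : Nat => 1 + 1 * (k : Int)) := by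
  rw [PySem.List.pyRange_of_pos _ _ (by norm_num)]
  rw [if_pos (by exact_mod_cast Nat.lt_succ_of_le hm)]
  norm_num

theorem pv_range_nodup (m : Nat) : ((List.range m).map (fun k : Nat => 1 + 1 * (k : Int))).Nodup := by
  refine List.Nodup.map ?_ List.nodup_range
  intro a b h
  simpa using h

theorem pv_tail_eq (body : List String) (m k : Nat) :
    pvB_tail body (m : Int) (k : Int) = (pvEveryNth (body.drop k) (m : Int)).foldl pvB_app "" := by
  unfold pvB_tail
  rw [PySem.List.slice_from _ (Int.natCast_nonneg k), Int.toNat_natCast]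

-- ===== VERDICT (by name: the statement is the Claim_ definition above) =====
theorem read_phylip_interleaved_spec : Claim_equal_read_phylip_interleaved := by
  intro file nseqs nchars hdom hpre
  obtain ⟨h1, h2⟩ := hpre
  unfold Spec_read_phylip_interleaved
  set m := nseqs.toNat with hmdef
  have hnn : nseqs = (m : Int) := by omega
  have hm1 : 1 ≤ m := by omega
  have hmlen : m ≤ file.length := by omega
  simp only [read_phylip_interleaved, read_phylip_interleaved_alt]
  rw [hnn, Int.toNat_natCast]
  rw [pv_phase1_rest m file 0 PySem.Dict.empty PySem.Dict.empty hmlen]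
  rw [show (((file.drop m).map PySem.Str.rstrip).filter (fun l => l != "")) =
        pvFilt (file.drop m) from rfl]
  set so := (pvA_phase1 m file 0 PySem.Dict.empty PySem.Dict.empty).2.1 with hso
  set ds1 := (pvA_phase1 m file 0 PySem.Dict.empty PySem.Dict.empty).2.2 with hds1
  set body := pvFilt (file.drop m) with hbody
  set P2 := ((file.drop m).foldl (pvA_step2 (m : Int)) (0, ds1)).2 with hP2
  -- phase-2 values = B's stride tails
  have hd2 : ∀ k : Nat, k < m → P2.getD ((k : Int) + 1) "" = pvB_tail body (m : Int) (k : Int) := by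
    intro k hk
    have := pv_phase2 m hm1 (file.drop m) 0 ds1 (k + 1) hm1 (by omega) (by omega)
    rw [Nat.cast_zero] at this
    have hcast : (((k + 1 : Nat)) : Int) = (k : Int) + 1 := by push_cast; ring
    rw [hcast] at this
    rw [hP2, this]
    rw [pv_phase1_ds m file 0 PySem.Dict.empty PySem.Dict.empty (fun j => rfl) ((k : Int) + 1)]
    have hoff : pvOff m 0 (k + 1) = k := by simp [pvOff]
    rw [hoff, pv_tail_eq]
    simp only [String.empty_append]
    rfl
  -- the header lines as A and B see them
  have hso' : ∀ k : Nat, k < m → so.getD ((k : Int) + 1) "" = PySem.Str.strip (file.getD k "") := by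
    intro k hk
    rw [hso, pv_phase1_so m file 0 PySem.Dict.empty PySem.Dict.empty hmlen]
    rw [if_pos (by constructor <;> omega)]
    have : ((k : Int) + 1 - 0 - 1).toNat = k := by omega
    rw [this]
  have htails : ∀ k : Nat, k < m →
      ((List.range m).map (fun (i : Nat) => pvB_tail body (m : Int) (i : Int))).getD k "" =
        pvB_tail body (m : Int) (k : Int) :=
    fun k hk => pv_getD_map_range m k _ hk
  -- the two rest_len values agree
  have hrl : P2.getD 1 "" =
      ((List.range m).map (fun (i : Nat) => pvB_tail body (m : Int) (i : Int))).getD 0 "" := by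
    rw [htails 0 hm1]
    have h0 := hd2 0 hm1
    simpa using h0
  rw [← hrl]
  -- the final loops build the same string-keyed dict
  rw [pv_pyRange_eq m hm1]
  rw [pv_phase3 so (nchars - PySem.Str.len (P2.getD 1 "")) _ (fun i => P2.getD i "") _ _
      (fun j _ => rfl) (pv_range_nodup m)]
  rw [List.foldl_map]
  refine congrArg PySem.Dict.items (PySem.List.foldl_congr_mem _ _ _ _ ?_)
  intro acc k hkmem
  have hk : k < m := List.mem_range.mp hkmem
  have hca : 1 + 1 * (k : Int) = (k : Int) + 1 := by ring
  rw [hca, hso' k hk, hd2 k hk, pv_getD_map_take file m k PySem.Str.strip hk hmlen, htails k hk]
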